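-- pv_equiv track=rewrite | github.com/reza-asad/3DSSR | models/Baselines/brute_force_3dssr.py | find_query_candidates
-- ===== SOURCE A (Python) =====
-- def find_query_candidates(anchor, query_objects, query_scene, target_scene):
--     # map the categories in the target scene to the object ids.
--     cat_to_target_objects = {}
--     for obj, obj_info in target_scene.items():
--         cat = obj_info['category'][0]
--         if cat not in cat_to_target_objects:
--             cat_to_target_objects[cat] = [obj]
--         else:
--             cat_to_target_objects[cat].append(obj)
--
--     # map each query object to the target objects with same category
--     q_to_candidates = {}
--     for q_obj in query_objects:
--         q_cat = query_scene[q_obj]['category'][0]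
--         if q_cat in cat_to_target_objects:
--             q_to_candidates[q_obj] = cat_to_target_objects[q_cat]
--
--     # return empty dict if the anchor has not match.
--     if anchor not in q_to_candidates:
--         return {}
--
--     return q_to_candidates
-- ===== SOURCE B (Python) =====
-- def find_query_candidates(anchor, query_objects, query_scene, target_scene):
--     # For each query object, scan the target scene directly for objects of the
--     # same category (no precomputed category index).
--     q_to_candidates = {}
--     for q_obj in query_objects:
--         q_cat = query_scene[q_obj]['category'][0]
--         matches = [obj for obj, obj_info in target_scene.items()
--                    if obj_info['category'][0] == q_cat]
--         if matches:
--             q_to_candidates[q_obj] = matches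
--     if anchor not in q_to_candidates:
--         return {}
--     return q_to_candidates
-- ===== Notes on version B (the rewrite author's own statement) =====
-- stated objective: alternative
-- what changed: B drops A's precomputed category->objects index and instead, per query object, rescans target_scene building a fresh list of same-category objects; the single-pass grouping dict disappears.
import Mathlib
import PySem

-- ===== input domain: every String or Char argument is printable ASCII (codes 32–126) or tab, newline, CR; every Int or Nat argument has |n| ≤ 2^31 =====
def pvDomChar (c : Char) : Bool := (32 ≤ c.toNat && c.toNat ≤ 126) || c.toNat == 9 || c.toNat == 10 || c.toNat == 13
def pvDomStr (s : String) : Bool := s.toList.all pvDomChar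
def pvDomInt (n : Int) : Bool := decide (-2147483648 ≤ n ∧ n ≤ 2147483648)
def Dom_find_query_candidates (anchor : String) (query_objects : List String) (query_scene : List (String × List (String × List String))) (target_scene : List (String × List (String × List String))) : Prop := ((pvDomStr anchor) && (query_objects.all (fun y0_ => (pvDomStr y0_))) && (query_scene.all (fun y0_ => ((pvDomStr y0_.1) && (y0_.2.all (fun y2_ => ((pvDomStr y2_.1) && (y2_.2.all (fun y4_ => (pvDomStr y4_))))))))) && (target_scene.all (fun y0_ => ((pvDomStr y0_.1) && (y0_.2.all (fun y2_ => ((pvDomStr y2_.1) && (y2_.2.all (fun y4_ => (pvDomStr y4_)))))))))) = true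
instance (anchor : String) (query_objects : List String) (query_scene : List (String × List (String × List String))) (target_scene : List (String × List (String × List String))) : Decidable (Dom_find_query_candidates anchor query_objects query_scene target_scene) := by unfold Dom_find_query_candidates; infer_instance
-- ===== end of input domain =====

-- B replaces A's single-pass category index by a per-query rescan of the target scene (alternative decomposition, same return value).

-- obj_info['category'][0], defaulting where Python would raise (such inputs are outside Pre_)
def pvCat (info : List (String × List String)) : String :=
  (PySem.List.pyGet? (((PySem.Dict.ofList info).get? "category").getD []) 0).getD ""

-- ===== PORT A =====
def find_query_candidates (anchor : String) (query_objects : List String) (query_scene : List (String × List (String × List String))) (target_scene : List (String × List (String × List String))) : List (String × List String) :=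
  let cat_to : PySem.Dict String (List String) :=
    (PySem.Dict.ofList target_scene).items.foldl (fun d p =>
      let cat := pvCat p.2
      if d.contains cat = false then d.insert cat [p.1]
      else d.insert cat (d.getD cat [] ++ [p.1])) PySem.Dict.empty
  let q_to : PySem.Dict String (List String) :=
    query_objects.foldl (fun d q_obj =>
      let q_cat := pvCat (((PySem.Dict.ofList query_scene).get? q_obj).getD [])
      if cat_to.contains q_cat then d.insert q_obj (cat_to.getD q_cat []) else d)
      PySem.Dict.empty
  if q_to.contains anchor = false then [] else q_to.items

-- ===== PORT B =====
def find_query_candidates_alt (anchor : String) (query_objects : List String) (query_scene : List (String × List (String × List String))) (target_scene : List (String × List (String × List String))) : List (String × List String) :=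
  let q_to : PySem.Dict String (List String) :=
    query_objects.foldl (fun d q_obj =>
      let q_cat := pvCat (((PySem.Dict.ofList query_scene).get? q_obj).getD [])
      let cands := ((PySem.Dict.ofList target_scene).items.filter
          (fun p => pvCat p.2 == q_cat)).map Prod.fst
      if cands.isEmpty then d else d.insert q_obj cands)
      PySem.Dict.empty
  if q_to.contains anchor = false then [] else q_to.items

-- ===== PRECONDITION & SPEC =====
-- Pre_ = exactly the inputs where Python A returns (no KeyError/IndexError): every target
-- object has a non-empty 'category' list, and every query object is a key of query_scene
-- with a non-empty 'category' list.
def Pre_find_query_candidates (anchor : String) (query_objects : List String) (query_scene : List (String × List (String × List String))) (target_scene : List (String × List (String × List String))) : Prop :=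
  (∀ p ∈ (PySem.Dict.ofList target_scene).items,
      ((PySem.Dict.ofList p.2).get? "category").getD [] ≠ []) ∧
  (∀ q ∈ query_objects,
      ((PySem.Dict.ofList query_scene).get? q).isSome = true ∧
      ((PySem.Dict.ofList (((PySem.Dict.ofList query_scene).get? q).getD [])).get? "category").getD [] ≠ [])
instance (anchor : String) (query_objects : List String) (query_scene : List (String × List (String × List String))) (target_scene : List (String × List (String × List String))) : Decidable (Pre_find_query_candidates anchor query_objects query_scene target_scene) := by unfold Pre_find_query_candidates; infer_instance

def pvWitness_find_query_candidates : String × List String × (List (String × List (String × List String))) × (List (String × List (String × List String))) :=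
  ("q1", ["q1"], [("q1", [("category", ["chair"])])], [("t1", [("category", ["chair"])]), ("t2", [("category", ["table"])])])

def Spec_find_query_candidates (anchor : String) (query_objects : List String) (query_scene : List (String × List (String × List String))) (target_scene : List (String × List (String × List String))) (out : List (String × List String)) : Prop := out = find_query_candidates_alt anchor query_objects query_scene target_scene
instance (anchor : String) (query_objects : List String) (query_scene : List (String × List (String × List String))) (target_scene : List (String × List (String × List String))) (out : List (String × List String)) : Decidable (Spec_find_query_candidates anchor query_objects query_scene target_scene out) := by unfold Spec_find_query_candidates; infer_instance

-- ===== CLAIM (what is proved, stated in full; the proofs are below) =====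
def Claim_equal_find_query_candidates : Prop := ∀ (anchor : String) (query_objects : List String) (query_scene : List (String × List (String × List String))) (target_scene : List (String × List (String × List String))), Dom_find_query_candidates anchor query_objects query_scene target_scene → Pre_find_query_candidates anchor query_objects query_scene target_scene → Spec_find_query_candidates anchor query_objects query_scene target_scene (find_query_candidates anchor query_objects query_scene target_scene)

-- ===== LEMMAS AND PROOFS =====

-- A's grouping fold: lookup yields the accumulator's entry followed by the (in-order) members of the category.
theorem groupA_getD (l : List (String × List (String × List String)))
    (d : PySem.Dict String (List String)) (c : String) :
    (l.foldl (fun d p =>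
      let cat := pvCat p.2
      if d.contains cat = false then d.insert cat [p.1]
      else d.insert cat (d.getD cat [] ++ [p.1])) d).getD c []
    = d.getD c [] ++ (l.filter (fun p => pvCat p.2 == c)).map Prod.fst := by
  induction l generalizing d with
  | nil => simp
  | cons p t ih =>
    simp only [List.foldl_cons, List.filter_cons]
    rw [ih]
    by_cases hc : pvCat p.2 = c
    · subst hc
      simp only [beq_self_eq_true, if_pos, List.map_cons]
      by_cases h : d.contains (pvCat p.2) = false
      · rw [if_pos h, PySem.Dict.getD_insert_self, PySem.Dict.getD_of_not_contains d [] h]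
        simp
      · rw [if_neg h, PySem.Dict.getD_insert_self]
        simp
    · have hbe : (pvCat p.2 == c) = false := by simp [hc]
      rw [hbe]
      simp only [Bool.false_eq_true, ite_false]
      by_cases h : d.contains (pvCat p.2) = false
      · rw [if_pos h, PySem.Dict.getD_insert_of_ne _ _ _ (fun h' => hc h'.symm)]
      · rw [if_neg h, PySem.Dict.getD_insert_of_ne _ _ _ (fun h' => hc h'.symm)]

theorem groupA_contains (l : List (String × List (String × List String)))
    (d : PySem.Dict String (List String)) (c : String) :
    (l.foldl (fun d p =>
      let cat := pvCat p.2
      if d.contains cat = false then d.insert cat [p.1]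
      else d.insert cat (d.getD cat [] ++ [p.1])) d).contains c
    = (d.contains c || l.any (fun p => pvCat p.2 == c)) := by
  induction l generalizing d with
  | nil => simp
  | cons p t ih =>
    simp only [List.foldl_cons, List.any_cons]
    rw [ih]
    by_cases h : d.contains (pvCat p.2) = false
    · rw [if_pos h, PySem.Dict.contains_insert]
      cases hc : (c == pvCat p.2) <;> simp [hc, Bool.or_comm, BEq.comm]
    · rw [if_neg h, PySem.Dict.contains_insert]
      cases hc : (c == pvCat p.2) <;> simp [hc, Bool.or_comm, BEq.comm]

-- ===== VERDICT (by name: the statement is the Claim_ definition above) =====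
theorem find_query_candidates_spec : Claim_equal_find_query_candidates := by
  intro anchor query_objects query_scene target_scene _ _
  unfold Spec_find_query_candidates find_query_candidates find_query_candidates_alt
  have hstep : (fun (d : PySem.Dict String (List String)) q_obj =>
      let q_cat := pvCat (((PySem.Dict.ofList query_scene).get? q_obj).getD [])
      if ((PySem.Dict.ofList target_scene).items.foldl (fun d p =>
        let cat := pvCat p.2
        if d.contains cat = false then d.insert cat [p.1]
        else d.insert cat (d.getD cat [] ++ [p.1])) PySem.Dict.empty).contains q_cat
      then d.insert q_obj (((PySem.Dict.ofList target_scene).items.foldl (fun d p =>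
        let cat := pvCat p.2
        if d.contains cat = false then d.insert cat [p.1]
        else d.insert cat (d.getD cat [] ++ [p.1])) PySem.Dict.empty).getD q_cat [])
      else d)
    = (fun (d : PySem.Dict String (List String)) q_obj =>
      let q_cat := pvCat (((PySem.Dict.ofList query_scene).get? q_obj).getD [])
      let cands := ((PySem.Dict.ofList target_scene).items.filter
          (fun p => pvCat p.2 == q_cat)).map Prod.fst
      if cands.isEmpty then d else d.insert q_obj cands) := by
    funext d q_obj
    simp only [groupA_contains, groupA_getD, PySem.Dict.contains_empty,
      PySem.Dict.getD_empty, Bool.false_or, List.nil_append]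
    rcases h : ((PySem.Dict.ofList target_scene).items.any
        (fun p => pvCat p.2 == pvCat (((PySem.Dict.ofList query_scene).get? q_obj).getD []))) with _ | _
    · rw [if_neg (by simp), if_pos]
      rw [List.isEmpty_iff, List.map_eq_nil_iff, List.filter_eq_nil_iff]
      intro p hp
      simp only [List.any_eq_false] at h
      exact h p hp
    · rw [if_pos rfl, if_neg]
      rw [List.isEmpty_iff, List.map_eq_nil_iff, List.filter_eq_nil_iff]
      simp only [List.any_eq_true] at h
      obtain ⟨p, hp, hc⟩ := h
      intro hall
      exact absurd hc (by simpa using hall p hp)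
  simp only [hstep]
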